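-- pv_equiv track=rewrite | github.com/SuLab/OKN-WOBD | scripts/demos/demo_ecm_fibrosis.py | _infer_study_title
-- ===== SOURCE A (Python) =====
-- from typing import List, Dict, Any, Optional
--
-- def _infer_study_title(sample_titles: List[str]) -> str:
--     """Infer a study title from sample titles by finding common patterns."""
--     if not sample_titles:
--         return "Unknown study"
--
--     # If all titles share a common prefix, use that
--     if len(sample_titles) == 1:
--         return sample_titles[0]
--
--     # Find common prefix
--     prefix = sample_titles[0]
--     for title in sample_titles[1:]:
--         while prefix and not title.startswith(prefix):
--             prefix = prefix[:-1]
--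
--     if len(prefix) > 10:
--         return prefix.rstrip(" -_:")
--
--     # Otherwise, return first title
--     return sample_titles[0]
-- ===== SOURCE B (Python) =====
-- def _infer_study_title(sample_titles):
--     """Infer a study title from sample titles by finding common patterns."""
--     if not sample_titles:
--         return "Unknown study"
--     if len(sample_titles) == 1:
--         return sample_titles[0]
--     first = sample_titles[0]
--     n = min(len(t) for t in sample_titles)
--     i = 0
--     while i < n and all(t[i] == first[i] for t in sample_titles):
--         i += 1
--     prefix = first[:i]
--     if len(prefix) > 10:
--         return prefix.rstrip(" -_:")
--     return sample_titles[0]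
-- ===== Notes on version B (the rewrite author's own statement) =====
-- stated objective: alternative
-- what changed: Replaces the per-title backward shrink-one-char-at-a-time prefix loop with a single forward column-by-column scan (bounded by the minimum title length) that advances while every title agrees at that position.
import Mathlib
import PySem

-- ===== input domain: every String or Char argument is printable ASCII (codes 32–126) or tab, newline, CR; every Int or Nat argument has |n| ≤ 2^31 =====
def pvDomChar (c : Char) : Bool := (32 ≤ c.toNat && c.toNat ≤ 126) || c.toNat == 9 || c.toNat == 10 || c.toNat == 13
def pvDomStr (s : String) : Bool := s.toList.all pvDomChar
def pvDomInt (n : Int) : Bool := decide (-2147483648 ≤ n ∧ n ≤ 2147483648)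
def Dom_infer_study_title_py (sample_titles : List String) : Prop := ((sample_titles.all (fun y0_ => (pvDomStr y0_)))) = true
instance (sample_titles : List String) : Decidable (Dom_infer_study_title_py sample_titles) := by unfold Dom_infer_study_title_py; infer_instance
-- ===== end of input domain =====

-- B replaces A's per-title backward shrink of the candidate prefix by a single forward
-- column-by-column longest-common-prefix scan (objective: alternative algorithm, same result).


-- ===== PORT A =====
-- Python's  s.rstrip(" -_:")  — drop trailing chars from the set {' ','-','_',':'}
-- (exact: PySem has no rstrip-with-chars primitive, so it is ported by hand)
def pvRstripSetA (cs : List Char) : List Char :=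
  (cs.reverse.dropWhile (fun c => c == ' ' || c == '-' || c == '_' || c == ':')).reverse
-- A's inner 'while prefix and not title.startswith(prefix): prefix = prefix[:-1]'
def pvShrinkA (p t : List Char) : List Char :=
  if p = [] then p
  else if PySem.Chars.startswith t p then p
  else pvShrinkA p.dropLast t
termination_by p.length
decreasing_by
  rename_i h _
  have := List.length_pos_iff.mpr h
  simp only [List.length_dropLast]
  omega

def infer_study_title_py (sample_titles : List String) : String :=
  match sample_titles with
  | [] => "Unknown study"
  | [t] => t
  | t0 :: rest =>
    -- prefix = sample_titles[0]; for title in sample_titles[1:]: while … : prefix = prefix[:-1]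
    let prefx := rest.foldl (fun p t => pvShrinkA p t.toList) t0.toList
    if prefx.length > 10 then String.ofList (pvRstripSetA prefx) else t0

-- ===== PORT B =====
-- B's  prefix.rstrip(" -_:")  (same hand port, B-side copy)
def pvRstripSetB (cs : List Char) : List Char :=
  (cs.reverse.dropWhile (fun c => c == ' ' || c == '-' || c == '_' || c == ':')).reverse
-- B's 'while i < n and all(t[i] == first[i] for t in sample_titles): i += 1'
def pvScanB (ts : List (List Char)) (first : List Char) (n : Nat) (i : Nat) : Nat :=
  if h : i < n ∧ ts.all (fun t => t.getD i ' ' == first.getD i ' ') then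
    pvScanB ts first n (i + 1)
  else i
termination_by n - i
decreasing_by omega

def infer_study_title_py_alt (sample_titles : List String) : String :=
  match sample_titles with
  | [] => "Unknown study"
  | t0 :: rest =>
    if rest = [] then t0 else
    let first := t0.toList
    -- n = min(len(t) for t in sample_titles)
    let n := rest.foldl (fun m t => min m t.toList.length) first.length
    let i := pvScanB ((t0 :: rest).map String.toList) first n 0
    let prefx := first.take i
    if prefx.length > 10 then String.ofList (pvRstripSetB prefx) else t0

-- ===== PRECONDITION & SPEC =====
def Spec_infer_study_title_py (sample_titles : List String) (out : String) : Prop := out = infer_study_title_py_alt sample_titles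
instance (sample_titles : List String) (out : String) : Decidable (Spec_infer_study_title_py sample_titles out) := by unfold Spec_infer_study_title_py; infer_instance

-- ===== CLAIM (what is proved, stated in full; the proofs are below) =====
def Claim_equal_infer_study_title_py : Prop := ∀ (sample_titles : List String), Dom_infer_study_title_py sample_titles → Spec_infer_study_title_py sample_titles (infer_study_title_py sample_titles)

-- ===== LEMMAS AND PROOFS =====

/-- Longest common prefix of two char lists. -/
def pvLcp : List Char → List Char → List Char
  | x :: xs, y :: ys => if x = y then x :: pvLcp xs ys else []
  | _, _ => []

theorem pvLcp_prefix_left (a b : List Char) : pvLcp a b <+: a := by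
  induction a generalizing b with
  | nil => simp [pvLcp]
  | cons x xs ih =>
    cases b with
    | nil => simp [pvLcp]
    | cons y ys =>
      simp only [pvLcp]
      split_ifs with h
      · exact List.cons_prefix_cons.mpr ⟨rfl, ih ys⟩
      · exact List.nil_prefix

theorem pvLcp_prefix_right (a b : List Char) : pvLcp a b <+: b := by
  induction a generalizing b with
  | nil => simp [pvLcp]
  | cons x xs ih =>
    cases b with
    | nil => simp [pvLcp]
    | cons y ys =>
      simp only [pvLcp]
      split_ifs with h
      · subst h; exact List.cons_prefix_cons.mpr ⟨rfl, ih ys⟩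
      · exact List.nil_prefix

theorem pvLcp_greatest (p a b : List Char) (ha : p <+: a) (hb : p <+: b) : p <+: pvLcp a b := by
  induction p generalizing a b with
  | nil => exact List.nil_prefix
  | cons c cs ih =>
    obtain ⟨ta, rfl⟩ := ha
    obtain ⟨tb, hb'⟩ := hb
    cases b with
    | nil => simp at hb'
    | cons y ys =>
      obtain ⟨rfl, hys⟩ := List.cons_eq_cons.mp hb'.symm
      simp only [List.cons_append, pvLcp, if_pos]
      exact List.cons_prefix_cons.mpr ⟨rfl, ih _ _ (List.prefix_append cs ta) ⟨tb, hys.symm⟩⟩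

theorem pvLcp_of_prefix_left (a b : List Char) (h : a <+: b) : pvLcp a b = a :=
  (pvLcp_prefix_left a b).eq_of_length
    (Nat.le_antisymm (pvLcp_prefix_left a b).length_le (pvLcp_greatest a a b List.prefix_rfl h).length_le)

theorem pvLcp_take (a b : List Char) (k : Nat) : pvLcp (a.take k) b = (pvLcp a b).take k := by
  induction a generalizing b k with
  | nil => simp [pvLcp]
  | cons x xs ih =>
    cases k with
    | zero => simp only [List.take_zero]; cases b <;> rfl
    | succ k =>
      cases b with
      | nil => simp [pvLcp]
      | cons y ys =>
        simp only [List.take_succ_cons, pvLcp]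
        split_ifs with h
        · simp [ih]
        · simp

theorem pvShrinkA_eq_lcp (p t : List Char) : pvShrinkA p t = pvLcp p t := by
  induction hn : p.length using Nat.strong_induction_on generalizing p with
  | _ n ih =>
    rw [pvShrinkA]
    split_ifs with h1 h2
    · subst h1; simp [pvLcp]
    · exact (pvLcp_of_prefix_left p t ((PySem.Chars.startswith_iff _ _).mp h2)).symm
    · have hlt : (pvLcp p t).length < p.length := by
        rcases Nat.lt_or_ge (pvLcp p t).length p.length with h | h
        · exact h
        · exfalso
          exact h2 ((PySem.Chars.startswith_iff _ _).mpr
            (((pvLcp_prefix_left p t).eq_of_length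
              (Nat.le_antisymm (pvLcp_prefix_left p t).length_le h)) ▸ pvLcp_prefix_right p t))
      have hd : p.dropLast = p.take (p.length - 1) := by
        rw [List.dropLast_eq_take]
      rw [ih p.dropLast.length (by subst hn; simp [List.length_dropLast]; omega) p.dropLast rfl,
          hd, pvLcp_take, List.take_of_length_le (by omega)]

/-- The fold of A equals the fold of `pvLcp`. -/
theorem foldA_eq_foldLcp (rest : List String) (acc : List Char) :
    rest.foldl (fun p t => pvShrinkA p t.toList) acc = rest.foldl (fun p t => pvLcp p t.toList) acc := by
  simp only [pvShrinkA_eq_lcp]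

theorem foldLcp_prefix (rest : List String) (acc : List Char) :
    rest.foldl (fun p t => pvLcp p t.toList) acc <+: acc ∧
    ∀ t ∈ rest, rest.foldl (fun p t => pvLcp p t.toList) acc <+: t.toList := by
  induction rest generalizing acc with
  | nil => exact ⟨List.prefix_rfl, by simp⟩
  | cons u rest ih =>
    obtain ⟨h1, h2⟩ := ih (pvLcp acc u.toList)
    refine ⟨h1.trans (pvLcp_prefix_left _ _), ?_⟩
    intro t ht
    rcases List.mem_cons.mp ht with rfl | ht
    · exact h1.trans (pvLcp_prefix_right _ _)
    · exact h2 t ht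

theorem foldLcp_greatest (rest : List String) (acc p : List Char)
    (ha : p <+: acc) (hr : ∀ t ∈ rest, p <+: t.toList) :
    p <+: rest.foldl (fun p t => pvLcp p t.toList) acc := by
  induction rest generalizing acc with
  | nil => exact ha
  | cons u rest ih =>
    exact ih (pvLcp acc u.toList)
      (pvLcp_greatest p acc u.toList ha (hr u (List.mem_cons_self)))
      (fun t ht => hr t (List.mem_cons_of_mem u ht))

-- min fold facts
theorem foldMin_le (rest : List String) (a : Nat) :
    rest.foldl (fun m t => min m t.toList.length) a ≤ a ∧
    ∀ t ∈ rest, rest.foldl (fun m t => min m t.toList.length) a ≤ t.toList.length := by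
  induction rest generalizing a with
  | nil => exact ⟨Nat.le_refl a, by simp⟩
  | cons u rest ih =>
    obtain ⟨h1, h2⟩ := ih (min a u.toList.length)
    refine ⟨h1.trans (Nat.min_le_left _ _), ?_⟩
    intro t ht
    rcases List.mem_cons.mp ht with rfl | ht
    · exact h1.trans (Nat.min_le_right _ _)
    · exact h2 t ht

theorem le_foldMin (rest : List String) (a b : Nat)
    (ha : b ≤ a) (hr : ∀ t ∈ rest, b ≤ t.toList.length) :
    b ≤ rest.foldl (fun m t => min m t.toList.length) a := by
  induction rest generalizing a with
  | nil => exact ha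
  | cons u rest ih =>
    exact ih (min a u.toList.length)
      (Nat.le_min.mpr ⟨ha, hr u (List.mem_cons_self)⟩)
      (fun t ht => hr t (List.mem_cons_of_mem u ht))

theorem prefix_take_succ (first t : List Char) (i : Nat)
    (hp : first.take i <+: t) (hi : i < first.length) (ht : i < t.length)
    (he : t[i] = first[i]) : first.take (i + 1) <+: t := by
  rw [List.prefix_iff_eq_take] at hp ⊢
  have hlen : (first.take (i+1)).length = i + 1 := by simp; omega
  have hlen' : (first.take i).length = i := by simp; omega
  rw [hlen]
  rw [hlen'] at hp
  rw [List.take_add_one, List.take_add_one, ← hp]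
  have h1 : first[i]? = some first[i] := List.getElem?_eq_getElem hi
  have h2 : t[i]? = some t[i] := List.getElem?_eq_getElem ht
  rw [h1, h2, he]

/-- Soundness/maximality of the column scan. -/
theorem pvScanB_spec (ts : List (List Char)) (first : List Char) (n : Nat)
    (hfirst : first ∈ ts) (hn : ∀ t ∈ ts, n ≤ t.length) (i : Nat)
    (hinv : ∀ t ∈ ts, first.take i <+: t) (hi : i ≤ n) :
    (∀ t ∈ ts, first.take (pvScanB ts first n i) <+: t) ∧
    pvScanB ts first n i ≤ n ∧
    (pvScanB ts first n i = n ∨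
      ∃ t ∈ ts, t.getD (pvScanB ts first n i) ' ' ≠ first.getD (pvScanB ts first n i) ' ') := by
  induction hfuel : n - i using Nat.strong_induction_on generalizing i with
  | _ fuel ih =>
    rw [pvScanB]
    split_ifs with h
    · obtain ⟨hlt, hall⟩ := h
      have hfl : i < first.length := Nat.lt_of_lt_of_le hlt (hn first hfirst)
      have hinv' : ∀ t ∈ ts, first.take (i + 1) <+: t := by
        intro t ht
        have htl : i < t.length := Nat.lt_of_lt_of_le hlt (hn t ht)
        have he : t.getD i ' ' = first.getD i ' ' := by
          have := List.all_eq_true.mp hall t ht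
          exact eq_of_beq this
        rw [List.getD_eq_getElem t ' ' htl, List.getD_eq_getElem first ' ' hfl] at he
        exact prefix_take_succ first t i (hinv t ht) hfl htl he
      exact ih (n - (i + 1)) (by omega) (i + 1) hinv' hlt rfl
    · refine ⟨hinv, hi, ?_⟩
      rcases Nat.lt_or_ge i n with hlt | hge
      · right
        have hall := (not_and.mp h) hlt
        by_contra hc
        push Not at hc
        exact hall (List.all_eq_true.mpr (fun t ht => beq_iff_eq.mpr (hc t ht)))
      · left; omega

/-- Core equality: A's fold is B's take-of-scan. -/
theorem fold_eq_scan (t0 : String) (rest : List String) :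
    rest.foldl (fun p t => pvShrinkA p t.toList) t0.toList =
    t0.toList.take (pvScanB ((t0 :: rest).map String.toList) t0.toList
      (rest.foldl (fun m t => min m t.toList.length) t0.toList.length) 0) := by
  set first := t0.toList with hfirstdef
  set ts := (t0 :: rest).map String.toList with htsdef
  set n := rest.foldl (fun m t => min m t.toList.length) first.length with hndef
  have hfirst : first ∈ ts := by simp [htsdef, hfirstdef]
  have hn : ∀ t ∈ ts, n ≤ t.length := by
    intro t ht
    simp only [htsdef, List.mem_map, List.mem_cons] at ht
    obtain ⟨s, hs, rfl⟩ := ht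
    rcases hs with rfl | hs
    · exact (foldMin_le rest first.length).1
    · exact (foldMin_le rest first.length).2 s hs
  obtain ⟨hsound, hle, hstop⟩ := pvScanB_spec ts first n hfirst hn 0
    (by intro t ht; simp) (Nat.zero_le n)
  set S := pvScanB ts first n 0
  rw [foldA_eq_foldLcp]
  set g := rest.foldl (fun p t => pvLcp p t.toList) first with hgdef
  obtain ⟨hg1, hg2⟩ := foldLcp_prefix rest first
  rw [← hgdef] at hg1 hg2
  -- g <+: first.take S and conversely
  have hSg : first.take S <+: g := by
    apply foldLcp_greatest
    · exact hsound first hfirst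
    · intro t ht
      exact hsound t.toList (by simp [htsdef, List.mem_map]; right; exact ⟨t, ht, rfl⟩)
  have hgS : g <+: first.take S := by
    have hgfirst : g = first.take g.length := List.prefix_iff_eq_take.mp hg1
    have hglen : g.length ≤ S := by
      by_contra hc
      push Not at hc
      have hgn : g.length ≤ n := by
        apply le_foldMin
        · exact hg1.length_le
        · intro t ht; exact (hg2 t ht).length_le
      rcases hstop with hSn | ⟨t, ht, hne⟩
      · omega
      · -- S < g.length: all entries agree at column S
        have hSfl : S < first.length := Nat.lt_of_lt_of_le hc (hg1.length_le)
        have hgt : g <+: t := by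
          simp only [htsdef, List.mem_map, List.mem_cons] at ht
          obtain ⟨s, hs, rfl⟩ := ht
          rcases hs with rfl | hs
          · exact hg1
          · exact hg2 s hs
        have hStl : S < t.length := Nat.lt_of_lt_of_le hc hgt.length_le
        have e1 : g[S]'hc = first[S]'hSfl := hg1.getElem hc
        have e2 : g[S]'hc = t[S]'hStl := hgt.getElem hc
        rw [List.getD_eq_getElem t ' ' hStl, List.getD_eq_getElem first ' ' hSfl] at hne
        exact hne (e2.symm.trans e1)
    calc g = first.take g.length := hgfirst
    _ <+: first.take S := List.take_prefix_take_left hglen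
  exact (hgS.eq_of_length (Nat.le_antisymm hgS.length_le hSg.length_le))

-- ===== VERDICT (by name: the statement is the Claim_ definition above) =====
theorem infer_study_title_py_spec : Claim_equal_infer_study_title_py := by
  intro sample_titles _
  unfold Spec_infer_study_title_py infer_study_title_py infer_study_title_py_alt
  match sample_titles with
  | [] => rfl
  | [t] => rfl
  | t0 :: t1 :: rest =>
    simp only
    rw [fold_eq_scan t0 (t1 :: rest)]
    rfl
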